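-- pv_equiv track=rewrite | github.com/senaKash/ats-candidate-matching-experiment | parser_hr_dataset_v3_fixed.py | extract_resume_title
-- ===== SOURCE A (Python) =====
-- SERVICE_PREFIXES = (
--     "phone", "address", "portfolio", "email", "linkedin", "location"
-- )
--
-- JOB_TITLE_HINTS = (
--     "developer", "engineer", "architect", "programmer", "analyst",
--     "lead", "senior", "middle", "junior", "software", ".net", "backend",
--     "frontend", "full stack", "fullstack", "c#", "qa", "devops"
-- )
--
-- def is_service_line(line: str) -> bool:
--     s = (line or "").strip().lower()
--     if not s:
--         return True
--     return any(s.startswith(prefix + ":") or s == prefix for prefix in SERVICE_PREFIXES)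
--
-- def looks_like_job_title(line: str) -> bool:
--     s = (line or "").strip().lower()
--     if not s or len(s) > 120:
--         return False
--     if is_service_line(s):
--         return False
--     return any(hint in s for hint in JOB_TITLE_HINTS)
--
-- def extract_resume_title(lines: list[str]) -> str:
--     for line in lines[:20]:
--         line = line.strip()
--         if not line or is_service_line(line):
--             continue
--         if looks_like_job_title(line):
--             return line
--     for line in lines[:20]:
--         line = line.strip()
--         if line and not is_service_line(line):
--             return line
--     return ""
-- ===== SOURCE B (Python) =====
-- SERVICE_PREFIXES = (
--     "phone", "address", "portfolio", "email", "linkedin", "location"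
-- )
--
-- JOB_TITLE_HINTS = (
--     "developer", "engineer", "architect", "programmer", "analyst",
--     "lead", "senior", "middle", "junior", "software", ".net", "backend",
--     "frontend", "full stack", "fullstack", "c#", "qa", "devops"
-- )
--
-- def is_service_line(line: str) -> bool:
--     s = (line or "").strip().lower()
--     if not s:
--         return True
--     return any(s.startswith(prefix + ":") or s == prefix for prefix in SERVICE_PREFIXES)
--
-- def looks_like_job_title(line: str) -> bool:
--     s = (line or "").strip().lower()
--     if not s or len(s) > 120:
--         return False
--     if is_service_line(s):
--         return False
--     return any(hint in s for hint in JOB_TITLE_HINTS)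
--
-- def extract_resume_title(lines: list[str]) -> str:
--     fallback = None
--     for line in lines[:20]:
--         s = line.strip()
--         if not s or is_service_line(s):
--             continue
--         if looks_like_job_title(s):
--             return s
--         if fallback is None:
--             fallback = s
--     return fallback if fallback is not None else ""
-- ===== Notes on version B (the rewrite author's own statement) =====
-- stated objective: simpler
-- what changed: Replaced A's two passes over lines[:20] (first hunting a job-title line, then re-scanning for any eligible line) by a single pass that returns the first job-title line immediately and remembers the first eligible line as a one-shot fallback.
import Mathlib
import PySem

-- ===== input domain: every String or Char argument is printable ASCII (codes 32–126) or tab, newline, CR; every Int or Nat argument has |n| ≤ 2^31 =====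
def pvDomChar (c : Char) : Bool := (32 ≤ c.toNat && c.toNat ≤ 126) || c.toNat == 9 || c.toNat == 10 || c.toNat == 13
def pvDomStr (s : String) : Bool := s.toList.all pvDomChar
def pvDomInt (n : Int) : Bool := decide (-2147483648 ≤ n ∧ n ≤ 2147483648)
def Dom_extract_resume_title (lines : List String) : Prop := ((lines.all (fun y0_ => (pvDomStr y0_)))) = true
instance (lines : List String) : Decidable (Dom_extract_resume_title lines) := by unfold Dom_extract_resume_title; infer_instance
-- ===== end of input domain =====

-- B replaces A's two passes over lines[:20] by a single pass with a one-shot fallback (objective: simpler).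

-- ===== PORT A =====
def pvServicePrefixes : List String :=
  ["phone", "address", "portfolio", "email", "linkedin", "location"]

def pvJobTitleHints : List String :=
  ["developer", "engineer", "architect", "programmer", "analyst",
   "lead", "senior", "middle", "junior", "software", ".net", "backend",
   "frontend", "full stack", "fullstack", "c#", "qa", "devops"]

def is_service_line (line : String) : Bool :=
  let s := PySem.Str.lower (PySem.Str.strip line)
  if s == "" then true
  else pvServicePrefixes.any (fun p => PySem.Str.startswith s (p ++ ":") || s == p)

def looks_like_job_title (line : String) : Bool :=
  let s := PySem.Str.lower (PySem.Str.strip line)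
  if s == "" || PySem.Str.len s > 120 then false
  else if is_service_line s then false
  else pvJobTitleHints.any (fun h => PySem.Str.isIn h s)

-- A's first loop: return the first job-title line (as Option, none = fell through)
def pvLoopA1 : List String → Option String
  | [] => none
  | l :: t =>
    let line := PySem.Str.strip l
    if line == "" || is_service_line line then pvLoopA1 t
    else if looks_like_job_title line then some line
    else pvLoopA1 t

-- A's second loop: return the first eligible line
def pvLoopA2 : List String → Option String
  | [] => none
  | l :: t =>
    let line := PySem.Str.strip l
    if line != "" && !is_service_line line then some line
    else pvLoopA2 t

def extract_resume_title (lines : List String) : String :=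
  let l20 := PySem.List.slice lines none (some 20)
  match pvLoopA1 l20 with
  | some s => s
  | none =>
    match pvLoopA2 l20 with
    | some s => s
    | none => ""

-- ===== PORT B =====
-- single pass; fb is the one-shot fallback (Python's `fallback`, None = Option.none)
def pvLoopB : List String → Option String → String
  | [], fb => fb.getD ""
  | l :: t, fb =>
    let s := PySem.Str.strip l
    if s == "" || is_service_line s then pvLoopB t fb
    else if looks_like_job_title s then s
    else pvLoopB t (fb.or (some s))

def extract_resume_title_alt (lines : List String) : String :=
  pvLoopB (PySem.List.slice lines none (some 20)) none

-- ===== PRECONDITION & SPEC =====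
def Spec_extract_resume_title (lines : List String) (out : String) : Prop := out = extract_resume_title_alt lines
instance (lines : List String) (out : String) : Decidable (Spec_extract_resume_title lines out) := by unfold Spec_extract_resume_title; infer_instance

-- ===== CLAIM (what is proved, stated in full; the proofs are below) =====
def Claim_equal_extract_resume_title : Prop := ∀ (lines : List String), Dom_extract_resume_title lines → Spec_extract_resume_title lines (extract_resume_title lines)

-- ===== LEMMAS AND PROOFS =====
theorem pvLoopB_eq (l : List String) (fb : Option String) :
    pvLoopB l fb =
      match pvLoopA1 l with
      | some s => s
      | none => (fb.or (pvLoopA2 l)).getD "" := by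
  induction l generalizing fb with
  | nil => simp [pvLoopB, pvLoopA1, pvLoopA2]
  | cons h t ih =>
    by_cases he : PySem.Str.strip h = ""
    · simp [pvLoopB, pvLoopA1, pvLoopA2, he, ih]
    · by_cases hs : is_service_line (PySem.Str.strip h) = true
      · simp [pvLoopB, pvLoopA1, pvLoopA2, hs, ih]
      · by_cases h3 : looks_like_job_title (PySem.Str.strip h) = true
        · simp [pvLoopB, pvLoopA1, he, hs, h3]
        · simp [pvLoopB, pvLoopA1, pvLoopA2, he, hs, h3, ih]

-- ===== VERDICT (by name: the statement is the Claim_ definition above) =====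
theorem extract_resume_title_spec : Claim_equal_extract_resume_title := by
  intro lines _
  unfold Spec_extract_resume_title extract_resume_title extract_resume_title_alt
  rw [pvLoopB_eq]
  cases hA1 : pvLoopA1 (PySem.List.slice lines none (some 20)) <;>
    cases hA2 : pvLoopA2 (PySem.List.slice lines none (some 20)) <;> simp [hA1, hA2]
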